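-- pv_equiv track=rewrite | github.com/barber5/conflictAnalysis | analyze_reports.py | get_most_recent_action_by_mod
-- ===== SOURCE A (Python) =====
-- def get_most_recent_action_by_mod(comment):
--     mod_action_idx = {}
--     for action in comment['actions'].values():
--         mod = action['moderator']
--         if mod not in mod_action_idx:
--             mod_action_idx[mod] = []
--         mod_action_idx[mod].append(action)
--     result = {}
--     for mod, actions in mod_action_idx.items():
--         most_recent_action = actions[0]
--         most_recent_time = actions[0]['action_created']
--         for action in actions:
--             if action['action_created'] > most_recent_time:
--                 most_recent_action = action
--                 most_recent_time = action['action_created']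
--         result[mod] = most_recent_action
--     return result
-- ===== SOURCE B (Python) =====
-- def get_most_recent_action_by_mod(comment):
--     result = {}
--     for action in comment['actions'].values():
--         mod = action['moderator']
--         if mod not in result or result[mod]['action_created'] < action['action_created']:
--             result[mod] = action
--     return result
-- ===== Notes on version B (the rewrite author's own statement) =====
-- stated objective: simpler
-- what changed: one streaming pass that keeps the current most-recent action per moderator in the result dict directly, replacing A's build-a-per-moderator-index-of-lists pass followed by a second nested scan over each group
import Mathlib
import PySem

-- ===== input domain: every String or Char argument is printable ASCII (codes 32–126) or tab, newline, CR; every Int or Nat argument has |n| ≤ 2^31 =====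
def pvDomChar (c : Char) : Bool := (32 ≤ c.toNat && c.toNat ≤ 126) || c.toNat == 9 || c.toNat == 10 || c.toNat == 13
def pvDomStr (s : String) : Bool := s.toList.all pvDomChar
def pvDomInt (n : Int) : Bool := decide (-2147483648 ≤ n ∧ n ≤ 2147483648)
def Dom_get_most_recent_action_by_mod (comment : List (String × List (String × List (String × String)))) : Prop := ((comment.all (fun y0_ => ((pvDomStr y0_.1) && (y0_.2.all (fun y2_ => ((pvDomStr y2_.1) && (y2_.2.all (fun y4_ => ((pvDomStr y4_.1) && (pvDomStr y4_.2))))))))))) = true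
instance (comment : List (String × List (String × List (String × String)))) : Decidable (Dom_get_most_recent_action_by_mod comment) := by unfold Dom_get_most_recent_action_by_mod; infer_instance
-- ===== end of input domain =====

-- B replaces A's two-phase "group all actions into per-moderator lists, then scan each group"
-- with one streaming pass that keeps the current most-recent action per moderator (objective: simpler).

-- Python d[k] on a str-keyed dict given as an association list: first match; Pre_ excludes the
-- KeyError case, so the "" default is never reached on admitted inputs (exact there).
def pyGetS (a : List (String × String)) (k : String) : String := (a.lookup k).getD ""

-- ===== PORT A =====
def get_most_recent_action_by_mod (comment : List (String × List (String × List (String × String)))) : List (String × List (String × String)) :=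
  -- for action in comment['actions'].values(): group by action['moderator']
  let actions := ((comment.lookup "actions").getD []).map (·.2)
  let mod_action_idx : PySem.Dict String (List (List (String × String))) :=
    actions.foldl (fun d action =>
      let m := pyGetS action "moderator"
      let d := if d.contains m then d else d.insert m []       -- if mod not in mod_action_idx: … = []
      d.insert m (d.getD m [] ++ [action]))                     -- mod_action_idx[mod].append(action)
      PySem.Dict.empty
  -- for mod, actions in mod_action_idx.items(): inner scan for the most recent action
  let result : PySem.Dict String (List (String × String)) :=
    mod_action_idx.items.foldl (fun r p =>
      let acts := p.2
      let init := acts.headD []                                 -- actions[0]; groups are never empty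
      let st := acts.foldl
        (fun (s : List (String × String) × String) action =>
          if s.2 < pyGetS action "action_created" then (action, pyGetS action "action_created") else s)
        (init, pyGetS init "action_created")
      r.insert p.1 st.1)
      PySem.Dict.empty
  result.items

-- ===== PORT B =====
def get_most_recent_action_by_mod_alt (comment : List (String × List (String × List (String × String)))) : List (String × List (String × String)) :=
  let actions := ((comment.lookup "actions").getD []).map (·.2)
  (actions.foldl (fun r action =>
      let m := pyGetS action "moderator"
      if !r.contains m || pyGetS (r.getD m []) "action_created" < pyGetS action "action_created"
      then r.insert m action else r)
    (PySem.Dict.empty : PySem.Dict String (List (String × String)))).items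

-- ===== PRECONDITION & SPEC =====
-- Pre_ = exactly the inputs where the Python A returns: the 'actions' key exists (else KeyError)
-- and every action has both the 'moderator' and the 'action_created' key (else KeyError).
def Pre_get_most_recent_action_by_mod (comment : List (String × List (String × List (String × String)))) : Prop :=
  (comment.lookup "actions").isSome = true ∧
  ∀ p ∈ (comment.lookup "actions").getD [],
    (p.2.lookup "moderator").isSome = true ∧ (p.2.lookup "action_created").isSome = true
instance (comment : List (String × List (String × List (String × String)))) : Decidable (Pre_get_most_recent_action_by_mod comment) := by unfold Pre_get_most_recent_action_by_mod; infer_instance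

def pvWitness_get_most_recent_action_by_mod : (List (String × List (String × List (String × String)))) :=
  [("actions", [("1", [("moderator", "alice"), ("action_created", "2020")]),
                ("2", [("moderator", "alice"), ("action_created", "2021")])])]

def Spec_get_most_recent_action_by_mod (comment : List (String × List (String × List (String × String)))) (out : List (String × List (String × String))) : Prop := out = get_most_recent_action_by_mod_alt comment
instance (comment : List (String × List (String × List (String × String)))) (out : List (String × List (String × String))) : Decidable (Spec_get_most_recent_action_by_mod comment out) := by unfold Spec_get_most_recent_action_by_mod; infer_instance

-- ===== CLAIM (what is proved, stated in full; the proofs are below) =====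
def Claim_equal_get_most_recent_action_by_mod : Prop := ∀ (comment : List (String × List (String × List (String × String)))), Dom_get_most_recent_action_by_mod comment → Pre_get_most_recent_action_by_mod comment → Spec_get_most_recent_action_by_mod comment (get_most_recent_action_by_mod comment)

-- ===== LEMMAS AND PROOFS =====

-- the best action of a group, streaming from a starting candidate
def bestFrom (m : List (String × String)) (l : List (List (String × String))) : List (String × String) :=
  l.foldl (fun m a => if pyGetS m "action_created" < pyGetS a "action_created" then a else m) m

-- A's inner (candidate, time) pair always carries the candidate's own time
theorem innerA_eq_bestFrom (l : List (List (String × String))) (m : List (String × String)) :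
    l.foldl (fun (s : List (String × String) × String) action =>
        if s.2 < pyGetS action "action_created" then (action, pyGetS action "action_created") else s)
      (m, pyGetS m "action_created")
    = (bestFrom m l, pyGetS (bestFrom m l) "action_created") := by
  induction l generalizing m with
  | nil => rfl
  | cons a tl ih =>
      simp only [List.foldl_cons, bestFrom] at *
      by_cases h : pyGetS m "action_created" < pyGetS a "action_created"
      · rw [if_pos h, if_pos h]; exact ih a
      · rw [if_neg h, if_neg h]; exact ih m

-- value A assigns to a group (groups are always nonempty cons lists)
def bestOf (as : List (List (String × String))) : List (String × String) :=
  bestFrom (as.headD []) (as.drop 1)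

theorem bestFrom_append (m : List (String × String)) (l : List (List (String × String))) (a : List (String × String)) :
    bestFrom m (l ++ [a])
      = if pyGetS (bestFrom m l) "action_created" < pyGetS a "action_created" then a else bestFrom m l := by
  simp [bestFrom]

theorem bestOf_append (as : List (List (String × String))) (a : List (String × String)) (h : as ≠ []) :
    bestOf (as ++ [a])
      = if pyGetS (bestOf as) "action_created" < pyGetS a "action_created" then a else bestOf as := by
  cases as with
  | nil => exact absurd rfl h
  | cons a0 tl => simp [bestOf, bestFrom_append]

-- per-group map from A's index entries to B's result entries
def Fb (p : String × List (List (String × String))) : String × List (String × String) := (p.1, bestOf p.2)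

theorem get?_mk_map (l : List (String × List (List (String × String)))) (m : String) :
    (PySem.Dict.mk (l.map Fb)).get? m = ((PySem.Dict.mk l).get? m).map bestOf := by
  induction l with
  | nil => rfl
  | cons p tl ih =>
      obtain ⟨k, v⟩ := p
      simp only [List.map_cons, Fb]
      rw [PySem.Dict.get?_mk_cons, PySem.Dict.get?_mk_cons]
      by_cases h : k == m <;> simp [h, ih]

-- named copies of the two loop bodies (definitionally equal to the lambdas in the ports)
def stepA (d : PySem.Dict String (List (List (String × String)))) (action : List (String × String)) :
    PySem.Dict String (List (List (String × String))) :=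
  let m := pyGetS action "moderator"
  let d := if d.contains m then d else d.insert m []
  d.insert m (d.getD m [] ++ [action])

def stepB (r : PySem.Dict String (List (String × String))) (action : List (String × String)) :
    PySem.Dict String (List (String × String)) :=
  let m := pyGetS action "moderator"
  if !r.contains m || pyGetS (r.getD m []) "action_created" < pyGetS action "action_created"
  then r.insert m action else r

-- value A's inner scan produces for a group
def innerF (p : String × List (List (String × String))) : List (String × String) :=
  (p.2.foldl
    (fun (s : List (String × String) × String) action =>
      if s.2 < pyGetS action "action_created" then (action, pyGetS action "action_created") else s)
    (p.2.headD [], pyGetS (p.2.headD []) "action_created")).1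

theorem innerF_eq_bestOf (p : String × List (List (String × String))) (h : p.2 ≠ []) :
    innerF p = bestOf p.2 := by
  obtain ⟨m, as⟩ := p
  cases as with
  | nil => exact absurd rfl h
  | cons a0 tl =>
      simp only [innerF, bestOf, List.headD_cons, List.foldl_cons, List.drop_one, List.tail_cons]
      rw [if_neg (lt_irrefl _), innerA_eq_bestFrom]

-- A's first loop keeps keys unique and every group nonempty
theorem foldA_inv (l : List (List (String × String)))
    (d : PySem.Dict String (List (List (String × String))))
    (hnd : d.keys.Nodup) (hne : ∀ p ∈ d.items, p.2 ≠ []) :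
    (l.foldl stepA d).keys.Nodup ∧ ∀ p ∈ (l.foldl stepA d).items, p.2 ≠ [] := by
  induction l generalizing d with
  | nil => exact ⟨hnd, hne⟩
  | cons a l ih =>
      simp only [List.foldl_cons]
      refine ih _ ?_ ?_
      · simp only [stepA]
        split
        · exact PySem.Dict.nodup_keys_insert _ _ _ hnd
        · exact PySem.Dict.nodup_keys_insert _ _ _ (PySem.Dict.nodup_keys_insert _ _ _ hnd)
      · intro p hp
        simp only [stepA] at hp
        rw [PySem.Dict.mem_items_insert] at hp
        rcases hp with hp | ⟨hp, hpne⟩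
        · subst hp; simp
        · split at hp
          · exact hne p hp
          · rw [PySem.Dict.mem_items_insert] at hp
            rcases hp with hp | ⟨hp, _⟩
            · exact absurd (congrArg Prod.fst hp) (by simpa using hpne)
            · exact hne p hp

-- the main invariant: B's streaming dict is the image under Fb of A's index dict
theorem stream_inv (l : List (List (String × String)))
    (d : PySem.Dict String (List (List (String × String))))
    (r : PySem.Dict String (List (String × String)))
    (hitems : r.items = d.items.map Fb)
    (hne : ∀ p ∈ d.items, p.2 ≠ ([] : List (List (String × String))))
    (hnd : d.keys.Nodup) :
    (l.foldl stepB r).items = (l.foldl stepA d).items.map Fb := by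
  induction l generalizing d r with
  | nil => exact hitems
  | cons a l ih =>
      simp only [List.foldl_cons]
      have hr : r = PySem.Dict.mk (d.items.map Fb) := PySem.Dict.ext (by rw [hitems])
      have hd : d = PySem.Dict.mk d.items := PySem.Dict.ext rfl
      have hget : r.get? (pyGetS a "moderator") = (d.get? (pyGetS a "moderator")).map bestOf := by
        rw [hr]; conv_rhs => rw [hd]
        exact get?_mk_map _ _
      have hcont : r.contains (pyGetS a "moderator") = d.contains (pyGetS a "moderator") := by
        rw [PySem.Dict.contains_eq_isSome_get?, PySem.Dict.contains_eq_isSome_get?, hget]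
        cases d.get? (pyGetS a "moderator") <;> rfl
      cases hcd : d.contains (pyGetS a "moderator") with
      | false =>
          have hB : stepB r a = r.insert (pyGetS a "moderator") a := by
            simp [stepB, hcont, hcd]
          have hA : stepA d a = d.insert (pyGetS a "moderator") [a] := by
            simp [stepA, hcd, PySem.Dict.getD_insert_self, PySem.Dict.insert_insert_self]
          rw [hB, hA]
          refine ih _ _ ?_ ?_ ?_
          · rw [PySem.Dict.items_insert_of_not_contains _ _ (by rw [hcont]; exact hcd),
                PySem.Dict.items_insert_of_not_contains _ _ hcd, hitems, List.map_append]
            rfl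
          · intro p hp
            rw [PySem.Dict.mem_items_insert] at hp
            rcases hp with hp | ⟨hp, _⟩
            · subst hp; simp
            · exact hne p hp
          · exact PySem.Dict.nodup_keys_insert _ _ _ hnd
      | true =>
          obtain ⟨as, has⟩ : ∃ as, d.get? (pyGetS a "moderator") = some as := by
            have := PySem.Dict.contains_eq_isSome_get? (d := d) (k := pyGetS a "moderator")
            rw [hcd] at this
            exact Option.isSome_iff_exists.mp this.symm
          have hasmem : (pyGetS a "moderator", as) ∈ d.items := PySem.Dict.mem_items_of_get?_eq_some _ has
          have hasne : as ≠ [] := hne _ hasmem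
          have hgetDd : d.getD (pyGetS a "moderator") [] = as := PySem.Dict.getD_of_get?_eq_some _ _ has
          have hgetDr : r.getD (pyGetS a "moderator") [] = bestOf as := by
            rw [PySem.Dict.getD_eq_get?_getD, hget, has]; rfl
          have hA : stepA d a = d.insert (pyGetS a "moderator") (as ++ [a]) := by
            simp only [stepA, hcd, if_true, hgetDd]
          have hkeynd : ∀ p ∈ d.items, (p.1 == pyGetS a "moderator") = true → p = (pyGetS a "moderator", as) := by
            intro p hp hpk
            have hpk' : p.1 = pyGetS a "moderator" := by simpa using hpk
            have hmapnd : (d.items.map Prod.fst).Nodup := by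
              simpa [PySem.Dict.keys] using hnd
            have := List.inj_on_of_nodup_map hmapnd hp hasmem (by simpa using hpk')
            exact this
          have hitemsA : (stepA d a).items
              = d.items.map (fun p => if p.1 == pyGetS a "moderator" then (pyGetS a "moderator", as ++ [a]) else p) := by
            rw [hA, PySem.Dict.items_insert_of_contains _ _ hcd]
          cases ht : decide (pyGetS (bestOf as) "action_created" < pyGetS a "action_created") with
          | true =>
              have ht' : pyGetS (bestOf as) "action_created" < pyGetS a "action_created" := of_decide_eq_true ht
              have hB : stepB r a = r.insert (pyGetS a "moderator") a := by
                simp [stepB, hcont, hcd, hgetDr, ht']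
              rw [hB]
              refine ih _ _ ?_ ?_ ?_
              · rw [PySem.Dict.items_insert_of_contains _ _ (by rw [hcont]; exact hcd),
                    hitemsA, hitems, List.map_map, List.map_map]
                refine List.map_congr_left ?_
                intro p hp
                by_cases hpm : (p.1 == pyGetS a "moderator") = true
                · simp only [Function.comp_apply, hpm, if_true, Fb, bestOf_append as a hasne,
                    if_pos ht']
                · have hpm' : p.1 ≠ pyGetS a "moderator" := by simpa using hpm
                  simp [Function.comp_apply, Fb, hpm']
              · intro p hp
                rw [hitemsA] at hp
                obtain ⟨q, hq, hqe⟩ := List.mem_map.mp hp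
                by_cases hqm : (q.1 == pyGetS a "moderator") = true
                · rw [if_pos hqm] at hqe; subst hqe; simp
                · rw [if_neg hqm] at hqe; subst hqe; exact hne q hq
              · rw [hA]; exact PySem.Dict.nodup_keys_insert _ _ _ hnd
          | false =>
              have ht' : ¬ pyGetS (bestOf as) "action_created" < pyGetS a "action_created" :=
                of_decide_eq_false ht
              have hB : stepB r a = r := by
                simp [stepB, hcont, hcd, hgetDr, ht']
              rw [hB]
              refine ih _ _ ?_ ?_ ?_
              · rw [hitemsA, hitems, List.map_map]
                refine List.map_congr_left ?_
                intro p hp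
                by_cases hpm : (p.1 == pyGetS a "moderator") = true
                · have hpe := hkeynd p hp hpm
                  subst hpe
                  simp only [Function.comp_apply, hpm, if_true, Fb, bestOf_append as a hasne,
                    if_neg ht']
                · have hpm' : p.1 ≠ pyGetS a "moderator" := by simpa using hpm
                  simp [Function.comp_apply, Fb, hpm']
              · intro p hp
                rw [hitemsA] at hp
                obtain ⟨q, hq, hqe⟩ := List.mem_map.mp hp
                by_cases hqm : (q.1 == pyGetS a "moderator") = true
                · rw [if_pos hqm] at hqe; subst hqe; simp
                · rw [if_neg hqm] at hqe; subst hqe; exact hne q hq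
              · rw [hA]; exact PySem.Dict.nodup_keys_insert _ _ _ hnd

-- A's second loop over the index just writes each group's best, in index order
theorem result_items (l : List (String × List (List (String × String))))
    (hnd : (l.map Prod.fst).Nodup) (hne : ∀ p ∈ l, p.2 ≠ []) :
    (l.foldl (fun r p => r.insert p.1 (innerF p)) PySem.Dict.empty).items = l.map Fb := by
  have h := PySem.Dict.items_foldl_insert_fresh (l := l) (k := Prod.fst) (v := innerF)
    (d := PySem.Dict.empty) (by intro p _; exact PySem.Dict.contains_empty _) hnd
  rw [h, show (PySem.Dict.empty : PySem.Dict String (List (String × String))).items = [] from rfl,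
      List.nil_append]
  refine List.map_congr_left ?_
  intro p hp
  simp [Fb, innerF_eq_bestOf p (hne p hp)]

-- ===== VERDICT (by name: the statement is the Claim_ definition above) =====
theorem get_most_recent_action_by_mod_spec : Claim_equal_get_most_recent_action_by_mod := by
  intro comment _ _
  unfold Spec_get_most_recent_action_by_mod
  show (((((comment.lookup "actions").getD []).map (·.2)).foldl stepA PySem.Dict.empty).items.foldl
      (fun r p => r.insert p.1 (innerF p)) PySem.Dict.empty).items
    = ((((comment.lookup "actions").getD []).map (·.2)).foldl stepB PySem.Dict.empty).items
  have hinv := foldA_inv ((((comment.lookup "actions").getD []).map (·.2))) PySem.Dict.empty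
    (by rw [PySem.Dict.keys_empty]; exact List.nodup_nil)
    (by intro p hp; rw [show (PySem.Dict.empty : PySem.Dict String (List (List (String × String)))).items = [] from rfl] at hp; cases hp)
  rw [result_items _ (by simpa [PySem.Dict.keys] using hinv.1) hinv.2,
      stream_inv _ PySem.Dict.empty PySem.Dict.empty rfl
        (by intro p hp; rw [show (PySem.Dict.empty : PySem.Dict String (List (List (String × String)))).items = [] from rfl] at hp; cases hp)
        (by rw [PySem.Dict.keys_empty]; exact List.nodup_nil)]
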